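-- pv_equiv track=rewrite | github.com/Noaarhk/algorithm_pr | programmers_pr/strange_str.py | solution_0
-- ===== SOURCE A (Python) =====
-- def solution_0(s):
--     s_dict = {}
--     s_list = s.split(" ")
--     result = []
--
--     for i, word in enumerate(s_list):
--         s_dict[i] = word
--
--     for i in s_dict:
--         ans = ""
--
--         for j in range(len(s_dict[i])):
--             if j % 2 == 0:
--                 ans += s_dict[i][j].upper()
--             else:
--                 ans += s_dict[i][j].lower()
--
--         result.append(ans)
--
--     result = " ".join(result)
--
--     return result
-- ===== SOURCE B (Python) =====
-- def solution_0(s):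
--     out = []
--     k = 0
--     for ch in s:
--         if ch == " ":
--             out.append(" ")
--             k = 0
--         else:
--             out.append(ch.upper() if k % 2 == 0 else ch.lower())
--             k += 1
--     return "".join(out)
-- ===== Notes on version B (the rewrite author's own statement) =====
-- stated objective: simpler
-- what changed: Replaced A's split-into-words + index-to-word dict + nested index loops + join pipeline by a single flat pass over the characters with a position counter that resets to 0 at each space.
import Mathlib
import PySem

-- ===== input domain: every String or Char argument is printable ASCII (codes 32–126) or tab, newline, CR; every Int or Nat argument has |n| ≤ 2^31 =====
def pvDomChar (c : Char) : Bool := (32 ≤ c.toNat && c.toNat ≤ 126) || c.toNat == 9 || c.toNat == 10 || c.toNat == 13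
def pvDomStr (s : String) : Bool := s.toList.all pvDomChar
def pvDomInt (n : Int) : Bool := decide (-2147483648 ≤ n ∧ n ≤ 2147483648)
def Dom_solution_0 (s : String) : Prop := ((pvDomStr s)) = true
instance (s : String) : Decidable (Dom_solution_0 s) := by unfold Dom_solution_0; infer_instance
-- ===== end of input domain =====

-- B replaces A's split/dict/nested-loop pipeline by one flat pass over the characters with a
-- position counter that resets at each space (objective: simpler).

-- ===== PORT A =====
def solution_0 (s : String) : String :=
  let s_list := PySem.Chars.splitOn s.toList [' ']
  let s_dict : PySem.Dict Int (List Char) :=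
    (PySem.List.enumerate s_list 0).foldl (fun d p => d.insert p.1 p.2) PySem.Dict.empty
  let result := s_dict.keys.foldl (fun result i =>
    let w := s_dict.getD i []
    let ans := (PySem.List.pyRange 0 (w.length : Int) 1).foldl (fun ans j =>
      if PySem.Int.mod j 2 == 0 then ans ++ [PySem.Chars.upperChar (PySem.List.pyGetD w j ' ')]
      else ans ++ [PySem.Chars.lowerChar (PySem.List.pyGetD w j ' ')]) ([] : List Char)
    result ++ [ans]) ([] : List (List Char))
  String.mk (PySem.Chars.join [' '] result)

-- ===== PORT B =====
def solution_0_alt (s : String) : String :=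
  let p := s.toList.foldl (fun (acc : List Char × Nat) ch =>
    if ch = ' ' then (acc.1 ++ [' '], 0)
    else (acc.1 ++ [if acc.2 % 2 = 0 then PySem.Chars.upperChar ch else PySem.Chars.lowerChar ch],
          acc.2 + 1)) (([] : List Char), 0)
  String.mk p.1

-- ===== PRECONDITION & SPEC =====
def Spec_solution_0 (s : String) (out : String) : Prop := out = solution_0_alt s
instance (s : String) (out : String) : Decidable (Spec_solution_0 s out) := by unfold Spec_solution_0; infer_instance

-- ===== CLAIM (what is proved, stated in full; the proofs are below) =====
def Claim_equal_solution_0 : Prop := ∀ (s : String), Dom_solution_0 s → Spec_solution_0 s (solution_0 s)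

-- ===== LEMMAS AND PROOFS =====

-- structural single-char split on ' '
def mySplit : List Char → List (List Char)
  | [] => [[]]
  | c :: t => if c = ' ' then [] :: mySplit t else
      match mySplit t with
      | [] => [[c]]
      | h :: r => (c :: h) :: r

-- prepend onto the head chunk
def consH (x : List Char) : List (List Char) → List (List Char)
  | [] => [x]
  | h :: t => (x ++ h) :: t

-- alternating case starting at offset k
def altFrom (k : Nat) : List Char → List Char
  | [] => []
  | c :: t => (if k % 2 = 0 then PySem.Chars.upperChar c else PySem.Chars.lowerChar c) :: altFrom (k + 1) t

-- B's flat scan, tail-free form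
def bgo : List Char → Nat → List Char
  | [], _ => []
  | c :: t, k =>
    if c = ' ' then ' ' :: bgo t 0
    else (if k % 2 = 0 then PySem.Chars.upperChar c else PySem.Chars.lowerChar c) :: bgo t (k + 1)

theorem mySplit_ne_nil (l : List Char) : mySplit l ≠ [] := by
  cases l with
  | nil => simp [mySplit]
  | cons c t =>
    simp only [mySplit]
    split
    · simp
    · split <;> simp

theorem consH_nil_of_ne (ps : List (List Char)) (h : ps ≠ []) : consH [] ps = ps := by
  cases ps with
  | nil => exact absurd rfl h
  | cons a b => simp [consH]

theorem consH_assoc (x y : List Char) (ps : List (List Char)) :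
    consH (x ++ y) ps = consH x (consH y ps) := by
  cases ps <;> simp [consH]

theorem mySplit_cons_of_ne (c : Char) (t : List Char) (h : ¬ c = ' ') :
    mySplit (c :: t) = consH [c] (mySplit t) := by
  have := mySplit_ne_nil t
  simp only [mySplit, if_neg h]
  cases hm : mySplit t with
  | nil => exact absurd hm this
  | cons a b => simp [consH]

theorem go_space (fuel : Nat) : ∀ (l cur : List Char) (acc : List (List Char)),
    l.length ≤ fuel →
    PySem.Chars.splitOn.go [' '] fuel l cur acc = acc.reverse ++ consH cur.reverse (mySplit l) := by
  induction fuel with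
  | zero =>
    intro l cur acc h
    have : l = [] := List.eq_nil_of_length_eq_zero (Nat.le_zero.mp h)
    subst this
    rw [PySem.Chars.splitOn.go.eq_def]
    simp [mySplit, consH]
  | succ f ih =>
    intro l cur acc h
    cases l with
    | nil =>
      rw [PySem.Chars.splitOn.go.eq_def]
      simp [mySplit, consH]
    | cons c rest =>
      rw [PySem.Chars.splitOn.go.eq_def]
      simp only [List.isPrefixOf, List.length_cons, List.length_nil,
        List.drop_succ_cons, List.drop_zero]
      by_cases hc : c = ' '
      · subst hc
        rw [if_pos (by simp)]
        rw [ih rest [] (cur.reverse :: acc) (by simpa using h)]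
        rw [List.reverse_nil, consH_nil_of_ne _ (mySplit_ne_nil rest)]
        simp [mySplit, consH]
      · rw [if_neg (by simp; intro h'; exact absurd h'.symm hc)]
        rw [ih rest (c :: cur) acc (by simpa using Nat.le_of_succ_le_succ h)]
        rw [mySplit_cons_of_ne c rest hc]
        simp [List.reverse_cons, consH_assoc]

theorem splitOn_eq_mySplit (l : List Char) :
    PySem.Chars.splitOn l [' '] = mySplit l := by
  unfold PySem.Chars.splitOn
  rw [go_space (l.length + 1) l [] [] (Nat.le_succ _)]
  simp [consH_nil_of_ne _ (mySplit_ne_nil l)]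

-- the alternating-case word A computes, in index form
theorem range_map_alt (w : List Char) : ∀ (k0 : Nat),
    (List.range w.length).map (fun k =>
      if (k0 + k) % 2 = 0 then PySem.Chars.upperChar (w.getD k ' ')
      else PySem.Chars.lowerChar (w.getD k ' ')) = altFrom k0 w := by
  induction w with
  | nil => intro k0; simp [altFrom]
  | cons c t ih =>
    intro k0
    rw [List.length_cons, List.range_succ_eq_map]
    simp only [List.map_cons, List.map_map, altFrom, Nat.add_zero, List.getD_cons_zero]
    refine congrArg₂ _ rfl ?_
    rw [← ih (k0 + 1)]
    apply List.map_congr_left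
    intro k _
    simp only [Function.comp_apply, List.getD_cons_succ]
    have : k0 + 1 + k = k0 + (k + 1) := by omega
    rw [this]

theorem joinWords (w : List Char) (ws : List (List Char)) :
    PySem.Chars.join [' '] (w :: ws) = w ++ ws.flatMap (fun u => ' ' :: u) := by
  induction ws generalizing w with
  | nil => simp [PySem.Chars.join_singleton]
  | cons v vs ih => rw [PySem.Chars.join_cons_cons, ih v]; simp

theorem bgo_join (l : List Char) : ∀ (k : Nat),
    bgo l k = altFrom k (mySplit l).headI ++ ((mySplit l).tail.map (altFrom 0)).flatMap (fun u => ' ' :: u) := by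
  induction l with
  | nil => intro k; simp [mySplit, bgo, altFrom]
  | cons c t ih =>
    intro k
    by_cases hc : c = ' '
    · subst hc
      simp only [mySplit, bgo, List.headI, List.tail, if_pos]
      cases hm : mySplit t with
      | nil => exact absurd hm (mySplit_ne_nil t)
      | cons w ws =>
        rw [ih 0, hm]
        simp [altFrom]
    · rw [mySplit_cons_of_ne c t hc]
      cases hm : mySplit t with
      | nil => exact absurd hm (mySplit_ne_nil t)
      | cons w ws =>
        simp only [consH, List.headI, List.tail, bgo, if_neg hc]
        rw [ih (k + 1), hm]
        simp [altFrom]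

theorem B_foldl (l : List Char) : ∀ (out : List Char) (k : Nat),
    (l.foldl (fun (acc : List Char × Nat) ch =>
      if ch = ' ' then (acc.1 ++ [' '], 0)
      else (acc.1 ++ [if acc.2 % 2 = 0 then PySem.Chars.upperChar ch else PySem.Chars.lowerChar ch],
            acc.2 + 1)) (out, k)).1 = out ++ bgo l k := by
  induction l with
  | nil => intro out k; simp [bgo]
  | cons c t ih =>
    intro out k
    simp only [List.foldl_cons]
    by_cases hc : c = ' '
    · subst hc; rw [if_pos rfl, ih, bgo]; simp
    · rw [if_neg hc, ih]; simp [bgo, if_neg hc]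

theorem altA_eq (w : List Char) :
    (PySem.List.pyRange 0 (w.length : Int) 1).foldl (fun ans j =>
      if PySem.Int.mod j 2 == 0 then ans ++ [PySem.Chars.upperChar (PySem.List.pyGetD w j ' ')]
      else ans ++ [PySem.Chars.lowerChar (PySem.List.pyGetD w j ' ')]) ([] : List Char)
    = altFrom 0 w := by
  have hbody : (fun (ans : List Char) (j : Int) =>
      if PySem.Int.mod j 2 == 0 then ans ++ [PySem.Chars.upperChar (PySem.List.pyGetD w j ' ')]
      else ans ++ [PySem.Chars.lowerChar (PySem.List.pyGetD w j ' ')])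
    = (fun ans j => ans ++ [if PySem.Int.mod j 2 == 0 then PySem.Chars.upperChar (PySem.List.pyGetD w j ' ')
      else PySem.Chars.lowerChar (PySem.List.pyGetD w j ' ')]) := by
    funext ans j; split <;> rfl
  rw [hbody, PySem.List.foldl_append_singleton_eq_map, List.nil_append]
  rw [PySem.List.pyRange_one, List.map_map]
  rw [show (((w.length : Int)) - 0).toNat = w.length by simp]
  rw [← range_map_alt w 0]
  apply List.map_congr_left
  intro k hk
  simp only [Function.comp_apply, zero_add]
  rw [PySem.List.pyGetD_natCast]
  have hfm : PySem.Int.mod ((k : Nat) : Int) 2 = ((k % 2 : Nat) : Int) := by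
    show Int.fmod _ _ = _
    rw [Int.fmod_eq_emod]
    simp
  have hb : (PySem.Int.mod ((k : Nat) : Int) 2 == 0) = decide (k % 2 = 0) := by
    rw [hfm]
    by_cases hk2 : k % 2 = 0 <;> simp [hk2] <;> omega
  rw [hb]
  by_cases hk2 : k % 2 = 0 <;> simp [hk2, List.getD_eq_getElem?_getD]

theorem A_outer (f : List Char → List Char) (wl : List (List Char)) :
    (((PySem.List.enumerate wl 0).foldl (fun d p => d.insert p.1 p.2)
        (PySem.Dict.empty : PySem.Dict Int (List Char))).keys.foldl
      (fun result i => result ++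
        [f (((PySem.List.enumerate wl 0).foldl (fun d p => d.insert p.1 p.2)
          (PySem.Dict.empty : PySem.Dict Int (List Char))).getD i [])]) ([] : List (List Char)))
    = wl.map f := by
  have hnodup : ((PySem.List.enumerate wl 0).map (fun p => p.1)).Nodup := by
    rw [PySem.List.map_fst_enumerate]
    exact PySem.List.nodup_pyRange_one _ _
  have hitems : ((PySem.List.enumerate wl 0).foldl (fun d p => d.insert p.1 p.2)
      (PySem.Dict.empty : PySem.Dict Int (List Char))).items
      = (PySem.List.enumerate wl 0).map (fun p => (p.1, p.2)) := by
    rw [PySem.Dict.items_foldl_insert_fresh (PySem.List.enumerate wl 0)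
      (fun p => p.1) (fun p => p.2) PySem.Dict.empty (fun a _ => rfl) hnodup]
    rfl
  set d := (PySem.List.enumerate wl 0).foldl (fun d p => d.insert p.1 p.2)
      (PySem.Dict.empty : PySem.Dict Int (List Char)) with hd
  have hkeys : d.keys = (PySem.List.enumerate wl 0).map (fun p => p.1) := by
    simp only [PySem.Dict.keys, hitems, List.map_map]
    rfl
  have hknd : d.keys.Nodup := by rw [hkeys]; exact hnodup
  rw [PySem.List.foldl_append_singleton_eq_map (fun i => f (d.getD i []))]
  rw [List.nil_append, show (fun i => f (d.getD i [])) = f ∘ (fun i => d.getD i []) from rfl]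
  rw [← List.map_map]
  rw [← PySem.Dict.values_eq_map_keys d hknd []]
  have hvals : d.values = wl := by
    simp only [PySem.Dict.values, hitems, List.map_map]
    exact PySem.List.map_snd_enumerate wl 0
  rw [hvals]

theorem join_eq_bgo (l : List Char) :
    PySem.Chars.join [' '] ((mySplit l).map (altFrom 0)) = bgo l 0 := by
  cases hm : mySplit l with
  | nil => exact absurd hm (mySplit_ne_nil l)
  | cons w ws =>
    rw [List.map_cons, joinWords, bgo_join l 0, hm]
    simp

-- ===== VERDICT (by name: the statement is the Claim_ definition above) =====
theorem solution_0_spec : Claim_equal_solution_0 := by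
  unfold Claim_equal_solution_0
  intro s _
  unfold Spec_solution_0 solution_0 solution_0_alt
  dsimp only
  rw [B_foldl s.toList [] 0, List.nil_append]
  rw [splitOn_eq_mySplit]
  rw [A_outer (fun w => (PySem.List.pyRange 0 (w.length : Int) 1).foldl (fun ans j =>
      if PySem.Int.mod j 2 == 0 then ans ++ [PySem.Chars.upperChar (PySem.List.pyGetD w j ' ')]
      else ans ++ [PySem.Chars.lowerChar (PySem.List.pyGetD w j ' ')]) ([] : List Char))
    (mySplit s.toList)]
  rw [show (mySplit s.toList).map (fun w => (PySem.List.pyRange 0 (w.length : Int) 1).foldl (fun ans j =>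
      if PySem.Int.mod j 2 == 0 then ans ++ [PySem.Chars.upperChar (PySem.List.pyGetD w j ' ')]
      else ans ++ [PySem.Chars.lowerChar (PySem.List.pyGetD w j ' ')]) ([] : List Char))
    = (mySplit s.toList).map (altFrom 0) from List.map_congr_left (fun w _ => altA_eq w)]
  rw [join_eq_bgo]
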